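-- pv_equiv track=rewrite | github.com/trianglegrrl/eveHap | validation/run_validation.py | normalize_haplogroup
-- ===== SOURCE A (Python) =====
-- def normalize_haplogroup(hg: str) -> str:
--     """Normalize haplogroup for comparison."""
--     if not hg:
--         return ""
--     hg = hg.strip().upper()
--     # Remove common annotations
--     for char in ["'", "*", "!", "+", " "]:
--         if char in hg:
--             hg = hg.split(char)[0]
--     return hg
-- ===== SOURCE B (Python) =====
-- def normalize_haplogroup(hg: str) -> str:
--     """Normalize haplogroup for comparison."""
--     if not hg:
--         return ""
--     hg = hg.strip().upper()
--     delims = {"'", "*", "!", "+", " "}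
--     idx = next((i for i, c in enumerate(hg) if c in delims), len(hg))
--     return hg[:idx]
-- ===== Notes on version B (the rewrite author's own statement) =====
-- stated objective: simpler
-- what changed: Replaces the repeated split-at-each-of-five-delimiters loop by a single left-to-right scan that finds the first delimiter position and returns the prefix before it.
import Mathlib
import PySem

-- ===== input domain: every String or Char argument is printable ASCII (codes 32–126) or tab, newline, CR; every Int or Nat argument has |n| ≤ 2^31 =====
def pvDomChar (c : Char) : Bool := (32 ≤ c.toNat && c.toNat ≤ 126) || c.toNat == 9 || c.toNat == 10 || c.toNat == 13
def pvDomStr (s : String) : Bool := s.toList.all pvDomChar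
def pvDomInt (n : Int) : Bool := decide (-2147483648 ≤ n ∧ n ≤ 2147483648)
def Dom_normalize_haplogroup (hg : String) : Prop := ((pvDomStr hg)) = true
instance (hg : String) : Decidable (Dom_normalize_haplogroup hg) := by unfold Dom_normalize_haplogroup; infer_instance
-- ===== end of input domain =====

-- B replaces A's repeated split-at-each-delimiter loop with a single scan to the
-- first delimiter (objective: simpler).

-- ===== PORT A =====
-- hg.split(char)[0] when 'char in hg' (a split on a nonempty sep always yields a
-- nonempty list, so headD never takes its default)
def pvCutA (cs : List Char) (ch : Char) : List Char :=
  if PySem.Chars.isIn [ch] cs then (PySem.Chars.splitOn cs [ch]).headD [] else cs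

def normalize_haplogroup (hg : String) : String :=
  if hg == "" then "" else
    String.ofList (['\'', '*', '!', '+', ' '].foldl pvCutA
      (PySem.Chars.upper (PySem.Chars.strip hg.toList)))

-- ===== PORT B =====
def pvIsDelim (c : Char) : Bool := c == '\'' || c == '*' || c == '!' || c == '+' || c == ' '

def normalize_haplogroup_alt (hg : String) : String :=
  if hg == "" then "" else
    let cs := PySem.Chars.upper (PySem.Chars.strip hg.toList)
    String.ofList (cs.take (cs.findIdx pvIsDelim))

-- ===== PRECONDITION & SPEC =====
def Spec_normalize_haplogroup (hg : String) (out : String) : Prop := out = normalize_haplogroup_alt hg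
instance (hg : String) (out : String) : Decidable (Spec_normalize_haplogroup hg out) := by unfold Spec_normalize_haplogroup; infer_instance

-- ===== CLAIM (what is proved, stated in full; the proofs are below) =====
def Claim_equal_normalize_haplogroup : Prop := ∀ (hg : String), Dom_normalize_haplogroup hg → Spec_normalize_haplogroup hg (normalize_haplogroup hg)

-- ===== LEMMAS AND PROOFS =====

theorem pv_go_acc (sep : List Char) (fuel : Nat) (l cur : List Char) (acc : List (List Char)) :
    PySem.Chars.splitOn.go sep fuel l cur acc
      = acc.reverse ++ PySem.Chars.splitOn.go sep fuel l cur [] := by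
  induction fuel generalizing l cur acc with
  | zero => simp [PySem.Chars.splitOn.go]
  | succ f ih =>
    cases l with
    | nil => simp [PySem.Chars.splitOn.go]
    | cons c rest =>
      simp only [PySem.Chars.splitOn.go]
      split
      · rw [ih _ _ (cur.reverse :: acc), ih _ _ (cur.reverse :: [])]
        simp
      · exact ih _ _ acc

theorem pv_go_head (ch : Char) (fuel : Nat) (l cur : List Char) (h : l.length ≤ fuel) :
    (PySem.Chars.splitOn.go [ch] fuel l cur []).headD []
      = cur.reverse ++ l.takeWhile (fun c => c != ch) := by
  induction fuel generalizing l cur with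
  | zero =>
    have : l = [] := by cases l <;> simp_all
    subst this; simp [PySem.Chars.splitOn.go]
  | succ f ih =>
    cases l with
    | nil => simp [PySem.Chars.splitOn.go]
    | cons c rest =>
      simp only [PySem.Chars.splitOn.go]
      split
      · rename_i hpre
        have hc : c = ch := by
          have := hpre
          simp [List.isPrefixOf] at this
          exact this.symm
        rw [pv_go_acc]
        simp [hc]
      · rename_i hpre
        have hc : ¬ (c = ch) := by
          intro hcc; subst hcc; simp [List.isPrefixOf] at hpre
        rw [ih rest (c :: cur) (by simpa using Nat.le_of_succ_le_succ h)]
        simp [hc]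

theorem pv_cut_eq_takeWhile (cs : List Char) (ch : Char) :
    pvCutA cs ch = cs.takeWhile (fun c => c != ch) := by
  unfold pvCutA
  split
  · rw [PySem.Chars.splitOn, pv_go_head ch (cs.length + 1) cs [] (by omega)]
    simp
  · rename_i hin
    rw [List.takeWhile_eq_self_iff.mpr]
    intro a ha
    by_contra hne
    have ha' : ch ∈ cs := by
      simp at hne; subst hne; exact ha
    obtain ⟨s, t, rfl⟩ := List.append_of_mem ha'
    exact hin ((PySem.Chars.isIn_iff_infix _ _).mpr ⟨s, t, by simp⟩)

theorem pv_take_findIdx (p : Char → Bool) (cs : List Char) :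
    cs.take (cs.findIdx p) = cs.takeWhile (fun c => !p c) := by
  induction cs with
  | nil => simp
  | cons c rest ih =>
    by_cases h : p c
    · simp [List.findIdx_cons, h]
    · simp [List.findIdx_cons, h, ih]

-- ===== VERDICT (by name: the statement is the Claim_ definition above) =====
theorem normalize_haplogroup_spec : Claim_equal_normalize_haplogroup := by
  intro hg _
  unfold Spec_normalize_haplogroup normalize_haplogroup normalize_haplogroup_alt
  split
  · rfl
  · simp only [List.foldl_cons, List.foldl_nil, pv_cut_eq_takeWhile, List.takeWhile_takeWhile,
      pv_take_findIdx]
    congr 1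
    congr 1
    funext c
    by_cases h1 : c = '\'' ; · subst h1; decide
    by_cases h2 : c = '*' ; · subst h2; decide
    by_cases h3 : c = '!' ; · subst h3; decide
    by_cases h4 : c = '+' ; · subst h4; decide
    by_cases h5 : c = ' ' ; · subst h5; decide
    simp [pvIsDelim, h1, h2, h3, h4, h5]
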